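-- pv_equiv track=rewrite | github.com/windmzx/pyleetcode | 151. 翻转字符串里的单词.py | cleanspace
-- ===== SOURCE A (Python) =====
-- def cleanspace(s):
--     n = len(s)
--     i = 0
--     j = 0
--     while j < n:
--         while j <n and s[j] == ' ':
--             j += 1
--         while j < n and s[j] != ' ':
--             s[i] = s[j]
--             i += 1
--             j += 1
--         while j <n and s[j] == ' ':
--             j += 1
--         if j < n:
--             s[i] = " "
--             i += 1
--
--     return s[:i]
-- ===== SOURCE B (Python) =====
-- def cleanspace(s):
--     # Tokenize into words, then rejoin with single spaces (return value and
--     # in-place prefix mutation both match A's).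
--     words = []
--     cur = []
--     for c in s:
--         if c == ' ':
--             if cur:
--                 words.append(cur)
--                 cur = []
--         else:
--             cur.append(c)
--     if cur:
--         words.append(cur)
--     res = []
--     for w in words:
--         if res:
--             res.append(' ')
--         res.extend(w)
--     s[:len(res)] = res
--     return res
-- ===== Notes on version B (the rewrite author's own statement) =====
-- stated objective: simpler
-- what changed: Replaces A's in-place two-pointer compaction with nested index-bounded while loops by a tokenize-then-join pass: split the list into words at ' ' elements, then join the words with single spaces (the same prefix write-back is performed).
import Mathlib
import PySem

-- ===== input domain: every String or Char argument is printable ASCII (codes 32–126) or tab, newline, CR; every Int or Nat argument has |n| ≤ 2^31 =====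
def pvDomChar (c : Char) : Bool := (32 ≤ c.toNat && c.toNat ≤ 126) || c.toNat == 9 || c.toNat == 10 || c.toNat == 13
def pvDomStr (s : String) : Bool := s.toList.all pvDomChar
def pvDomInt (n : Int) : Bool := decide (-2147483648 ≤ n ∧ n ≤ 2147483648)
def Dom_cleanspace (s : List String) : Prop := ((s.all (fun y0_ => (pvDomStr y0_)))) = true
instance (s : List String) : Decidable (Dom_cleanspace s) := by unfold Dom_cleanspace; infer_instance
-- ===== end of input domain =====

-- B replaces A's two-pointer in-place compaction by a tokenize-then-join pass (same O(n) cost);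
-- the equivalence proved here is about the RETURN value only (both Pythons also mutate the
-- argument's prefix identically, which the Lean ports do not model).

-- ===== PORT A =====
-- while j < n and s[j] == ' ': j += 1
def aSkip (s : List String) (n j : Nat) : Nat :=
  if h : j < n ∧ s.getD j "" = " " then aSkip s n (j+1) else j
termination_by n - j
decreasing_by omega

-- while j < n and s[j] != ' ': s[i] = s[j]; i += 1; j += 1
def aCopy (s : List String) (n i j : Nat) : List String × Nat × Nat :=
  if h : j < n ∧ s.getD j "" ≠ " " then aCopy (s.set i (s.getD j "")) n (i+1) (j+1) else (s, i, j)
termination_by n - j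
decreasing_by omega

-- the outer `while j < n` loop; fuel only makes the recursion structural (n+1 always suffices,
-- as each iteration strictly increases j)
def aLoop (fuel : Nat) (s : List String) (n i j : Nat) : List String × Nat :=
  match fuel with
  | 0 => (s, i)
  | fuel + 1 =>
    if j < n then
      let j1 := aSkip s n j
      let r := aCopy s n i j1
      let j3 := aSkip r.1 n r.2.2
      if j3 < n then aLoop fuel (r.1.set r.2.1 " ") n (r.2.1 + 1) j3
      else (r.1, r.2.1)
    else (s, i)

def cleanspace (s : List String) : List String :=
  let n := s.length
  let r := aLoop (n + 1) s n 0 0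
  r.1.take r.2      -- return s[:i]

-- ===== PORT B =====
-- first loop of Source B: split s into the list of words (maximal runs of non-' ' elements)
def bSplit (cs : List String) (ws : List (List String)) (cur : List String) : List (List String) :=
  match cs with
  | [] => if cur.isEmpty then ws else ws ++ [cur]
  | c :: t =>
    if c = " " then
      if cur.isEmpty then bSplit t ws cur else bSplit t (ws ++ [cur]) []
    else bSplit t ws (cur ++ [c])

-- second loop of Source B: join the words with single spaces
def bJoin (ws : List (List String)) (res : List String) : List String :=
  match ws with
  | [] => res
  | w :: t => bJoin t ((if res.isEmpty then res else res ++ [" "]) ++ w)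

def cleanspace_alt (s : List String) : List String :=
  bJoin (bSplit s [] []) []

-- ===== PRECONDITION & SPEC =====
def Spec_cleanspace (s : List String) (out : List String) : Prop := out = cleanspace_alt s
instance (s : List String) (out : List String) : Decidable (Spec_cleanspace s out) := by unfold Spec_cleanspace; infer_instance

-- ===== CLAIM (what is proved, stated in full; the proofs are below) =====
def Claim_equal_cleanspace : Prop := ∀ (s : List String), Dom_cleanspace s → Spec_cleanspace s (cleanspace s)

-- ===== LEMMAS AND PROOFS =====

-- canonical description both sides are reduced to
def words (t : List String) : List (List String) :=
  match t with
  | [] => []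
  | c :: r =>
    if c = " " then words r
    else (c :: r.takeWhile (fun x => x ≠ " ")) :: words (r.dropWhile (fun x => x ≠ " "))
termination_by t.length
decreasing_by
  · simp
  · have := List.length_dropWhile_le (fun x => decide (x ≠ " ")) r
    simp only [List.length_cons]
    omega

def joinWords (ws : List (List String)) : List String :=
  match ws with
  | [] => []
  | w :: t => w ++ t.flatMap (fun v => " " :: v)

theorem take_succ_set {α : Type} (s : List α) (i : Nat) (v : α) (h : i < s.length) :
    (s.set i v).take (i+1) = s.take i ++ [v] := by
  rw [List.set_eq_take_cons_drop v h, List.take_append]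
  have hlen : (s.take i).length = i := by simp; omega
  rw [hlen]
  simp

theorem head_dropWhile_cons {α : Type} (p : α → Bool) (l : List α) (c : α) (rst : List α)
    (h : l.dropWhile p = c :: rst) : p c = false := by
  have hne : l.dropWhile p ≠ [] := by rw [h]; simp
  have h2 := List.head_dropWhile_not p hne
  simp only [h, List.head_cons] at h2
  exact h2

theorem drop_length_takeWhile {α : Type} (l : List α) (p : α → Bool) :
    l.drop ((l.takeWhile p).length) = l.dropWhile p := by
  induction l with
  | nil => rfl
  | cons a t ih => by_cases h : p a <;> simp [List.takeWhile, List.dropWhile, h, ih]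

theorem words_dropWhile_sp (t : List String) :
    words (t.dropWhile (fun c => c == " ")) = words t := by
  induction t with
  | nil => rfl
  | cons c r ih =>
    by_cases h : c = " "
    · subst h
      rw [show (" " :: r).dropWhile (fun c => c == " ") = r.dropWhile (fun c => c == " ") by
        rw [List.dropWhile_cons]; simp]
      rw [ih, show words (" " :: r) = words r by rw [words.eq_def]; simp]
    · simp [List.dropWhile_cons, h]

theorem words_cons_ne (c : String) (r : List String) (h : ¬ c = " ") :
    words (c :: r) = ((c :: r).takeWhile (fun x => x ≠ " ")) :: words ((c :: r).dropWhile (fun x => x ≠ " ")) := by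
  rw [words.eq_def]
  simp [h, List.takeWhile_cons, List.dropWhile_cons]

theorem words_head_ne (t : List String) (ht : t ≠ []) (hh : ¬ t.head ht = " ") : words t ≠ [] := by
  cases t with
  | nil => simp at ht
  | cons c r => rw [words_cons_ne c r (by simpa using hh)]; simp

theorem joinWords_cons_ne (w : List String) (ws : List (List String)) (h : ws ≠ []) :
    joinWords (w :: ws) = w ++ " " :: joinWords ws := by
  cases ws with
  | nil => simp at h
  | cons v rest => simp [joinWords]

-- ----- A side -----

theorem aSkip_le (s : List String) (n j : Nat) : j ≤ aSkip s n j := by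
  rw [aSkip]
  split
  · have := aSkip_le s n (j+1); omega
  · exact Nat.le_refl _
termination_by n - j
decreasing_by omega

theorem aCopy_le (s : List String) (n i j : Nat) : j ≤ (aCopy s n i j).2.2 := by
  rw [aCopy]
  split
  · have := aCopy_le (s.set i (s.getD j "")) n (i+1) (j+1); omega
  · exact Nat.le_refl _
termination_by n - j
decreasing_by omega

theorem aSkip_spec (s : List String) (j : Nat) (hj : j ≤ s.length) :
    aSkip s s.length j = j + (((s.drop j).takeWhile (fun c => c == " ")).length) := by
  rw [aSkip]
  split
  · rename_i h
    have hlt : j < s.length := h.1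
    have hd : s.drop j = s[j] :: s.drop (j+1) := List.drop_eq_getElem_cons hlt
    have hg : s.getD j "" = s[j] := List.getD_eq_getElem s "" hlt
    rw [aSkip_spec s (j+1) (by omega)]
    rw [hd]
    simp [List.takeWhile, hg ▸ h.2]
    omega
  · rename_i h
    by_cases hlt : j < s.length
    · have hd : s.drop j = s[j] :: s.drop (j+1) := List.drop_eq_getElem_cons hlt
      have hg : s.getD j "" = s[j] := List.getD_eq_getElem s "" hlt
      have hne : ¬ s[j] = " " := by intro e; exact h ⟨hlt, hg.trans e⟩
      rw [hd]; simp [List.takeWhile_cons, hne]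
    · have : s.drop j = [] := List.drop_eq_nil_of_le (by omega)
      simp [this]
termination_by s.length - j
decreasing_by omega

theorem aCopy_spec (s : List String) (i j : Nat) (hij : i ≤ j) (hj : j ≤ s.length) :
    (aCopy s s.length i j).1.length = s.length ∧
    (aCopy s s.length i j).2.1 = i + ((s.drop j).takeWhile (fun c => c ≠ " ")).length ∧
    (aCopy s s.length i j).2.2 = j + ((s.drop j).takeWhile (fun c => c ≠ " ")).length ∧
    (aCopy s s.length i j).1.take (aCopy s s.length i j).2.1 = s.take i ++ (s.drop j).takeWhile (fun c => c ≠ " ") ∧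
    (aCopy s s.length i j).1.drop (aCopy s s.length i j).2.2 = s.drop (j + ((s.drop j).takeWhile (fun c => c ≠ " ")).length) := by
  rw [aCopy]
  split
  · rename_i h
    have hlt : j < s.length := h.1
    have hd : s.drop j = s[j] :: s.drop (j+1) := List.drop_eq_getElem_cons hlt
    have hg : s.getD j "" = s[j] := List.getD_eq_getElem s "" hlt
    have hne : ¬ s[j] = " " := fun e => h.2 (hg.trans e)
    have hilt : i < s.length := by omega
    have hlen1 : (s.set i (s.getD j "")).length = s.length := by simp
    have ih := aCopy_spec (s.set i (s.getD j "")) (i+1) (j+1) (by omega) (by omega)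
    rw [hlen1] at ih
    obtain ⟨ih1, ih2, ih3, ih4, ih5⟩ := ih
    have hdrop1 : (s.set i (s.getD j "")).drop (j+1) = s.drop (j+1) :=
      List.drop_set_of_lt (by omega)
    have htw : (s.drop j).takeWhile (fun c => c ≠ " ")
        = s[j] :: ((s.drop (j+1)).takeWhile (fun c => c ≠ " ")) := by
      rw [hd, List.takeWhile_cons]; simp [hne]
    have htake1 : (s.set i (s.getD j "")).take (i+1) = s.take i ++ [s[j]] := by
      rw [hg]; exact take_succ_set s i s[j] hilt
    refine ⟨by rw [ih1], ?_, ?_, ?_, ?_⟩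
    · rw [ih2, hdrop1, htw]; simp; omega
    · rw [ih3, hdrop1, htw]; simp; omega
    · rw [ih4, hdrop1, htake1, htw]; simp
    · rw [ih5, hdrop1, htw]
      have : (s.set i (s.getD j "")).drop (j + 1 + ((s.drop (j+1)).takeWhile (fun c => c ≠ " ")).length)
          = s.drop (j + 1 + ((s.drop (j+1)).takeWhile (fun c => c ≠ " ")).length) :=
        List.drop_set_of_lt (by omega)
      rw [this]; simp; ring_nf
  · rename_i h
    have htw : (s.drop j).takeWhile (fun c => c ≠ " ") = [] := by
      by_cases hlt : j < s.length
      · have hd : s.drop j = s[j] :: s.drop (j+1) := List.drop_eq_getElem_cons hlt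
        have hg : s.getD j "" = s[j] := List.getD_eq_getElem s "" hlt
        have heq : s[j] = " " := by
          by_contra hne
          exact h ⟨hlt, fun e => hne (hg.symm.trans e)⟩
        rw [hd, List.takeWhile_cons]; simp [heq]
      · rw [List.drop_eq_nil_of_le (by omega)]; rfl
    refine ⟨rfl, ?_, ?_, ?_, ?_⟩ <;> rw [htw] <;> simp
termination_by s.length - j
decreasing_by omega

theorem aLoop_spec (fuel : Nat) : ∀ (s : List String) (i j : Nat), i ≤ j → j ≤ s.length →
    s.length - j < fuel →
    (aLoop fuel s s.length i j).1.take (aLoop fuel s s.length i j).2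
      = s.take i ++ joinWords (words (s.drop j)) := by
  induction fuel with
  | zero => intro s i j _ _ h; omega
  | succ fuel ih =>
    intro s i j hij hj hfuel
    by_cases hjn : j < s.length
    · rw [aLoop]
      simp only [if_pos hjn]
      set j1 := aSkip s s.length j with hj1def
      set r := aCopy s s.length i j1 with hrdef
      set j3 := aSkip r.1 s.length r.2.2 with hj3def
      have hsk1 := aSkip_spec s j (le_of_lt hjn)
      rw [← hj1def] at hsk1
      have hj1ge : j ≤ j1 := hj1def ▸ aSkip_le s s.length j
      have hj1le : j1 ≤ s.length := by
        have h1 : ((s.drop j).takeWhile (fun c => c == " ")).length ≤ (s.drop j).length :=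
          (List.takeWhile_prefix _).length_le
        have h2 : (s.drop j).length = s.length - j := List.length_drop
        omega
      have hdropj1 : s.drop j1 = (s.drop j).dropWhile (fun c => c == " ") := by
        rw [hsk1, ← List.drop_drop, drop_length_takeWhile]
      obtain ⟨hclen, hci, hcj, hctake, hcdrop⟩ := aCopy_spec s i j1 (hij.trans hj1ge) hj1le
      rw [← hrdef] at hclen hci hcj hctake hcdrop
      have hwlen : ((s.drop j1).takeWhile (fun c => c ≠ " ")).length ≤ (s.drop j1).length :=
        (List.takeWhile_prefix _).length_le
      have hdlen1 : (s.drop j1).length = s.length - j1 := List.length_drop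
      have hr22le : r.2.2 ≤ s.length := by omega
      have hr21le : r.2.1 ≤ r.2.2 := by omega
      have hrdrop : r.1.drop r.2.2 = s.drop r.2.2 := by rw [hcj] at hcdrop ⊢; exact hcdrop
      have hsdrop2 : s.drop r.2.2 = (s.drop j1).dropWhile (fun c => c ≠ " ") := by
        rw [hcj, ← List.drop_drop, drop_length_takeWhile]
      have hsk2 : j3 = r.2.2 + ((s.drop r.2.2).takeWhile (fun c => c == " ")).length := by
        have h1 := aSkip_spec r.1 r.2.2 (by omega)
        rw [hclen] at h1
        rw [hj3def, h1, hrdrop]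
      have hj3ge : r.2.2 ≤ j3 := hj3def ▸ aSkip_le r.1 s.length r.2.2
      have hdropj3 : r.1.drop j3 = (s.drop r.2.2).dropWhile (fun c => c == " ") := by
        rw [hsk2, ← List.drop_drop, hrdrop, drop_length_takeWhile]
      have hwords0 : words (s.drop j) = words (s.drop j1) := by
        rw [hdropj1, words_dropWhile_sp]
      by_cases hj3n : j3 < s.length
      · simp only [if_pos hj3n]
        -- r.2.2 < j3 : the head of s.drop r.2.2 is a space
        have hr22n : r.2.2 < s.length := by omega
        have h2ne : s.drop r.2.2 ≠ [] := by rw [Ne, List.drop_eq_nil_iff]; omega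
        obtain ⟨a, t2, hat2⟩ : ∃ a t2, s.drop r.2.2 = a :: t2 := by
          cases h : s.drop r.2.2 with
          | nil => exact absurd h h2ne
          | cons a t2 => exact ⟨a, t2, rfl⟩
        have ha : (fun c => decide (c ≠ " ")) a = false :=
          head_dropWhile_cons _ (s.drop j1) a t2 (hsdrop2.symm.trans hat2)
        have haeq : a = " " := by simpa using ha
        have hj3gt : r.2.2 < j3 := by
          rw [hsk2, hat2, List.takeWhile_cons]
          simp [haeq]
        have hi1n : r.2.1 < s.length := by omega
        have hslen : (r.1.set r.2.1 " ").length = s.length := by simp [hclen]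
        have IH := ih (r.1.set r.2.1 " ") (r.2.1 + 1) j3 (by omega) (by omega)
          (by rw [hslen]; omega)
        rw [hslen] at IH
        rw [IH]
        have hstake : (r.1.set r.2.1 " ").take (r.2.1 + 1) = r.1.take r.2.1 ++ [" "] :=
          take_succ_set r.1 r.2.1 " " (by omega)
        have hsdrop3 : (r.1.set r.2.1 " ").drop j3 = r.1.drop j3 :=
          List.drop_set_of_lt (by omega)
        rw [hstake, hsdrop3, hctake, hwords0]
        -- words (s.drop j1) = w :: words (s.drop r.2.2)
        have h1ne : s.drop j1 ≠ [] := by rw [Ne, List.drop_eq_nil_iff]; omega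
        obtain ⟨c, rst, hcr⟩ : ∃ c rst, s.drop j1 = c :: rst := by
          cases h : s.drop j1 with
          | nil => exact absurd h h1ne
          | cons c rst => exact ⟨c, rst, rfl⟩
        have hcne : ¬ c = " " := by
          have := head_dropWhile_cons _ (s.drop j) c rst (hdropj1.symm.trans hcr)
          simpa using this
        have hwords1 : words (s.drop j1)
            = ((s.drop j1).takeWhile (fun c => c ≠ " ")) :: words (s.drop r.2.2) := by
          rw [hcr, words.eq_def]
          simp only [if_neg hcne]
          rw [hsdrop2, hcr]
          simp [List.takeWhile_cons, List.dropWhile_cons, hcne]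
        rw [hwords1]
        have hwords3 : words (r.1.drop j3) = words (s.drop r.2.2) := by
          rw [hdropj3, words_dropWhile_sp]
        rw [← hwords3]
        have hw3ne : words (r.1.drop j3) ≠ [] := by
          have h3ne : r.1.drop j3 ≠ [] := by rw [Ne, List.drop_eq_nil_iff]; omega
          obtain ⟨b, t3, hbt3⟩ : ∃ b t3, r.1.drop j3 = b :: t3 := by
            cases h : r.1.drop j3 with
            | nil => exact absurd h h3ne
            | cons b t3 => exact ⟨b, t3, rfl⟩
          have hbne : ¬ b = " " := by
            have := head_dropWhile_cons _ (s.drop r.2.2) b t3 (hdropj3.symm.trans hbt3)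
            simpa using this
          exact hbt3 ▸ words_head_ne (b :: t3) (by simp) (by simpa using hbne)
        rw [joinWords_cons_ne _ _ hw3ne]
        simp
      · simp only [if_neg hj3n]
        rw [hctake, hwords0]
        have hdrop3nil : r.1.drop j3 = [] := List.drop_eq_nil_of_le (by omega)
        by_cases hj1n : j1 < s.length
        · have h1ne : s.drop j1 ≠ [] := by rw [Ne, List.drop_eq_nil_iff]; omega
          obtain ⟨c, rst, hcr⟩ : ∃ c rst, s.drop j1 = c :: rst := by
            cases h : s.drop j1 with
            | nil => exact absurd h h1ne
            | cons c rst => exact ⟨c, rst, rfl⟩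
          have hcne : ¬ c = " " := by
            have := head_dropWhile_cons _ (s.drop j) c rst (hdropj1.symm.trans hcr)
            simpa using this
          have hwords1 : words (s.drop j1)
              = ((s.drop j1).takeWhile (fun c => c ≠ " ")) :: words (s.drop r.2.2) := by
            rw [hcr, words.eq_def]
            simp only [if_neg hcne]
            rw [hsdrop2, hcr]
            simp [List.takeWhile_cons, List.dropWhile_cons, hcne]
          rw [hwords1]
          have hwords3 : words (s.drop r.2.2) = words (r.1.drop j3) := by
            rw [hdropj3, words_dropWhile_sp]
          rw [hwords3, hdrop3nil]
          simp [words, joinWords]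
        · have h1nil : s.drop j1 = [] := List.drop_eq_nil_of_le (by omega)
          rw [h1nil]
          simp [words, joinWords]
    · rw [aLoop]
      simp only [if_neg hjn]
      rw [List.drop_eq_nil_of_le (by omega)]
      simp [words, joinWords]

theorem bSplit_spec (cs : List String) : ∀ (ws : List (List String)) (cur : List String),
    bSplit cs ws cur = ws ++ (if cur.isEmpty then words cs
      else (cur ++ cs.takeWhile (fun x => x ≠ " ")) :: words (cs.dropWhile (fun x => x ≠ " "))) := by
  induction cs with
  | nil => intro ws cur; by_cases h : cur.isEmpty <;> simp [bSplit, h, words]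
  | cons c t ih =>
    intro ws cur
    by_cases hc : c = " "
    · by_cases h : cur.isEmpty
      · have hcur : cur = [] := List.isEmpty_iff.mp h
        rw [bSplit, if_pos hc, if_pos h, ih, hcur]
        rw [show words (c :: t) = words t by rw [words.eq_def]; simp [hc]]
        simp
      · rw [bSplit, if_pos hc, if_neg h, ih]
        rw [show ((c :: t).takeWhile (fun x => x ≠ " ")) = [] by simp [List.takeWhile_cons, hc]]
        rw [show ((c :: t).dropWhile (fun x => x ≠ " ")) = c :: t by simp [List.dropWhile_cons, hc]]
        rw [show words (c :: t) = words t by rw [words.eq_def]; simp [hc]]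
        simp [h]
    · rw [bSplit, if_neg hc, ih]
      have hne : (cur ++ [c]).isEmpty = false := by simp
      rw [hne]
      by_cases h : cur.isEmpty
      · have hcur : cur = [] := List.isEmpty_iff.mp h
        subst hcur
        rw [words_cons_ne c t hc]
        simp [h, List.takeWhile_cons, hc]
      · simp [h, List.takeWhile_cons, List.dropWhile_cons, hc]

theorem words_mem_ne_nil (t : List String) : ∀ w ∈ words t, w ≠ [] := by
  induction t using words.induct with
  | case1 => simp [words]
  | case2 r ih => rw [words.eq_def]; simpa using ih
  | case3 c r h ih =>
    rw [words.eq_def]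
    simp only [if_neg h, List.mem_cons]
    rintro w (rfl | hw)
    · simp
    · exact ih w hw

theorem bJoin_spec (ws : List (List String)) : ∀ (res : List String), res ≠ [] →
    bJoin ws res = res ++ ws.flatMap (fun v => " " :: v) := by
  induction ws with
  | nil => intro res _; simp [bJoin]
  | cons w t ih =>
    intro res hres
    show bJoin t ((if res.isEmpty then res else res ++ [" "]) ++ w) = _
    have h : res.isEmpty = false := by simpa [List.isEmpty_iff] using hres
    rw [h]
    simp only [Bool.false_eq_true, if_false, List.append_assoc]
    rw [show res ++ ([" "] ++ w) = res ++ [" "] ++ w by simp, ih (res ++ [" "] ++ w) (by simp)]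
    simp

theorem alt_eq_join (s : List String) : cleanspace_alt s = joinWords (words s) := by
  unfold cleanspace_alt
  rw [bSplit_spec]
  simp only [List.isEmpty_nil, if_pos rfl, List.nil_append]
  cases hw : words s with
  | nil => simp [bJoin, joinWords]
  | cons w t =>
    have hwne : w ≠ [] := words_mem_ne_nil s w (by rw [hw]; simp)
    show bJoin t ((if ([] : List String).isEmpty then ([] : List String) else [] ++ [" "]) ++ w) = _
    rw [show ((if ([] : List String).isEmpty = true then ([] : List String) else [] ++ [" "]) ++ w) = w by simp]
    rw [bJoin_spec t w hwne]
    rfl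

-- ===== VERDICT (by name: the statement is the Claim_ definition above) =====
theorem cleanspace_spec : Claim_equal_cleanspace := by
  intro s _
  unfold Spec_cleanspace
  rw [alt_eq_join]
  have h := aLoop_spec (s.length + 1) s 0 0 (Nat.le_refl _) (Nat.zero_le _) (by omega)
  simpa [cleanspace] using h
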